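-- pv_equiv track=rewrite | github.com/Kode-Rex/tddbuddy-reference-katas | ip-validator/python/src/ip_validator/ip_validator.py | _parse_octet
-- ===== SOURCE A (Python) =====
-- def _parse_octet(octet: str) -> int | None:
--     if len(octet) == 0:
--         return None
--     if len(octet) > 1 and octet[0] == "0":
--         return None
--
--     value = 0
--     for c in octet:
--         if not ("0" <= c <= "9"):
--             return None
--         value = value * 10 + (ord(c) - ord("0"))
--         if value > 255:
--             return None
--     return value
-- ===== SOURCE B (Python) =====
-- def _parse_octet(octet: str) -> int | None:
--     # validate-then-convert: guards, digit check, then length/lex range check, then positional sum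
--     if len(octet) == 0:
--         return None
--     if not all("0" <= c <= "9" for c in octet):
--         return None
--     if len(octet) > 1 and octet[0] == "0":
--         return None
--     if len(octet) > 3 or (len(octet) == 3 and octet > "255"):
--         return None
--     return sum((ord(c) - 48) * 10 ** i for i, c in enumerate(reversed(octet)))
-- ===== Notes on version B (the rewrite author's own statement) =====
-- stated objective: alternative
-- what changed: Replaced A's fused Horner loop with per-step overflow check by a validate-then-convert decomposition: an all()-digit scan, a length/lexicographic range test against the maximal octet string, and a positional power-of-ten sum over enumerate(reversed(octet)).
import Mathlib
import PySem

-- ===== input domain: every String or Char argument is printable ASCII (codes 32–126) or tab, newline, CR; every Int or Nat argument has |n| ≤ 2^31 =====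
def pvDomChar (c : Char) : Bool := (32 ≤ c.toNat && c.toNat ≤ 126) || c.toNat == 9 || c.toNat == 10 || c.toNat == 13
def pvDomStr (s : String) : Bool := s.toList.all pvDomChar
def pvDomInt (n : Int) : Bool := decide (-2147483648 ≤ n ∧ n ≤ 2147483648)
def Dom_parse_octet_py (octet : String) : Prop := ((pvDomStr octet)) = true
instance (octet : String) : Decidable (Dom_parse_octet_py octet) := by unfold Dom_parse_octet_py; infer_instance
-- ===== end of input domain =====

-- B separates validation from conversion: digit check, then a length/lexicographic range
-- test against "255", then a positional power-of-ten sum — instead of A's fused Horner loop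
-- with an in-loop overflow check; objective: alternative decomposition (no speed claim).

-- ===== PORT A =====
def pyLoopA : List Char → Int → Option Int
  | [], value => some value
  | c :: rest, value =>
    if ¬('0' ≤ c ∧ c ≤ '9') then none
    else
      let value' := value * 10 + ((c.toNat : Int) - 48)
      if value' > 255 then none else pyLoopA rest value'

def parse_octet_py (octet : String) : Option Int :=
  let cs := octet.toList
  if cs.length = 0 then none
  else if 1 < cs.length ∧ PySem.List.pyGet? cs 0 = some '0' then none
  else pyLoopA cs 0

-- ===== PORT B =====
def bIsDigit (c : Char) : Bool := decide ('0' ≤ c) && decide (c ≤ '9')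

def bValue (cs : List Char) : Int :=
  ((cs.reverse.zipIdx).map (fun p => ((p.1.toNat : Int) - 48) * 10 ^ p.2)).sum

def parse_octet_py_alt (octet : String) : Option Int :=
  let cs := octet.toList
  if cs.length = 0 then none
  else if ¬ (cs.all bIsDigit = true) then none
  else if 1 < cs.length ∧ cs[0]? = some '0' then none
  else if 3 < cs.length ∨ (cs.length = 3 ∧ "255".toList < cs) then none
  else some (bValue cs)

-- ===== PRECONDITION & SPEC =====
def Spec_parse_octet_py (octet : String) (out : Option Int) : Prop := out = parse_octet_py_alt octet
instance (octet : String) (out : Option Int) : Decidable (Spec_parse_octet_py octet out) := by unfold Spec_parse_octet_py; infer_instance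

-- ===== CLAIM (what is proved, stated in full; the proofs are below) =====
def Claim_equal_parse_octet_py : Prop := ∀ (octet : String), Dom_parse_octet_py octet → Spec_parse_octet_py octet (parse_octet_py octet)

-- ===== LEMMAS AND PROOFS =====

def horner (cs : List Char) (v : Int) : Int :=
  cs.foldl (fun v c => v * 10 + ((c.toNat : Int) - 48)) v

theorem horner_nil (v : Int) : horner [] v = v := rfl

theorem horner_cons (c : Char) (cs : List Char) (v : Int) :
    horner (c :: cs) v = horner cs (v * 10 + ((c.toNat : Int) - 48)) := rfl

theorem char_lt_iff (a b : Char) : a < b ↔ a.toNat < b.toNat := by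
  rw [Char.lt_def, UInt32.lt_iff_toNat_lt]; rfl

theorem char_le_iff (a b : Char) : a ≤ b ↔ a.toNat ≤ b.toNat := by
  rw [Char.le_def, UInt32.le_iff_toNat_le]; rfl

theorem char_eq_iff (a b : Char) : a = b ↔ a.toNat = b.toNat := by
  constructor
  · intro h; rw [h]
  · intro h; exact Char.ext (UInt32.toNat_inj.mp h)

theorem digit_bounds (c : Char) (h : bIsDigit c = true) : 48 ≤ c.toNat ∧ c.toNat ≤ 57 := by
  simp [bIsDigit] at h
  exact ⟨(char_le_iff '0' c).mp h.1, (char_le_iff c '9').mp h.2⟩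

theorem horner_acc (cs : List Char) (v : Int) :
    horner cs v = v * 10 ^ cs.length + horner cs 0 := by
  induction cs generalizing v with
  | nil => simp [horner_nil]
  | cons c rest ih =>
    rw [horner_cons, horner_cons, ih, ih (0 * 10 + ((c.toNat : Int) - 48))]
    simp [pow_succ]; ring

theorem horner_bounds (cs : List Char) (hd : ∀ c ∈ cs, bIsDigit c = true) :
    0 ≤ horner cs 0 ∧ horner cs 0 < 10 ^ cs.length := by
  induction cs with
  | nil => simp [horner_nil]
  | cons c rest ih =>
    obtain ⟨h1, h2⟩ := ih (fun x hx => hd x (List.mem_cons_of_mem c hx))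
    obtain ⟨d1, d2⟩ := digit_bounds c (hd c List.mem_cons_self)
    have d1' : (48 : Int) ≤ (c.toNat : Int) := by exact_mod_cast d1
    have d2' : (c.toNat : Int) ≤ 57 := by exact_mod_cast d2
    rw [horner_cons, horner_acc]
    have hp : (0 : Int) < 10 ^ rest.length := by positivity
    simp only [List.length_cons, pow_succ]
    constructor
    · nlinarith
    · nlinarith

theorem loop_nondigit (cs : List Char) (v : Int) (h : ¬ (cs.all bIsDigit = true)) :
    pyLoopA cs v = none := by
  induction cs generalizing v with
  | nil => simp at h
  | cons c rest ih =>
    simp only [List.all_cons, Bool.and_eq_true, not_and] at h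
    by_cases hc : bIsDigit c = true
    · have hd : '0' ≤ c ∧ c ≤ '9' := by simpa [bIsDigit] using hc
      rw [pyLoopA, if_neg (not_not_intro hd)]
      dsimp only
      split
      · rfl
      · exact ih _ (h hc)
    · have hnd : ¬('0' ≤ c ∧ c ≤ '9') := fun hd => hc (by simpa [bIsDigit] using hd)
      rw [pyLoopA, if_pos hnd]

theorem loop_eq (cs : List Char) (v : Int) (hall : cs.all bIsDigit = true)
    (hv0 : 0 ≤ v) (hv255 : v ≤ 255) :
    pyLoopA cs v = if horner cs v ≤ 255 then some (horner cs v) else none := by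
  induction cs generalizing v with
  | nil => simp [pyLoopA, horner_nil, hv255]
  | cons c rest ih =>
    simp only [List.all_cons, Bool.and_eq_true] at hall
    obtain ⟨hc, hrest⟩ := hall
    have hd : '0' ≤ c ∧ c ≤ '9' := by simpa [bIsDigit] using hc
    obtain ⟨d1, d2⟩ := digit_bounds c hc
    have hd1 : (48 : Int) ≤ (c.toNat : Int) := by exact_mod_cast d1
    rw [pyLoopA, if_neg (not_not_intro hd), horner_cons]
    by_cases h255 : v * 10 + ((c.toNat : Int) - 48) > 255
    · rw [if_pos h255]
      obtain ⟨hh0, _⟩ := horner_bounds rest (List.all_eq_true.mp hrest)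
      have hp : (1 : Int) ≤ 10 ^ rest.length := one_le_pow₀ (by norm_num)
      have hge : v * 10 + ((c.toNat : Int) - 48) ≤ horner rest (v * 10 + ((c.toNat : Int) - 48)) := by
        rw [horner_acc]
        nlinarith
      rw [if_neg (by omega)]
    · rw [if_neg h255]
      exact ih _ hrest (by omega) (by omega)

theorem value_eq_horner (cs : List Char) : bValue cs = horner cs 0 := by
  induction cs with
  | nil => simp [bValue, horner_nil]
  | cons c rest ih =>
    rw [horner_cons, horner_acc]
    unfold bValue
    rw [List.reverse_cons, List.zipIdx_append, List.map_append, List.sum_append]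
    simp only [List.length_reverse, List.zipIdx, List.map, List.sum_cons, List.sum_nil]
    rw [show ((rest.reverse.zipIdx).map (fun p => ((p.1.toNat : Int) - 48) * 10 ^ p.2)).sum
        = bValue rest from rfl, ih]
    push_cast
    ring

theorem lex3 (a b c : Char) : (['2','5','5'] < [a,b,c]) ↔
    ('2' < a ∨ (a = '2' ∧ ('5' < b ∨ (b = '5' ∧ '5' < c)))) := by
  constructor
  · intro h
    cases h with
    | rel h => exact Or.inl h
    | cons h =>
      cases h with
      | rel h => exact Or.inr ⟨rfl, Or.inl h⟩
      | cons h =>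
        cases h with
        | rel h => exact Or.inr ⟨rfl, Or.inr ⟨rfl, h⟩⟩
        | cons h => cases h
  · rintro (h | ⟨rfl, h | ⟨rfl, h⟩⟩)
    · exact List.Lex.rel h
    · exact List.Lex.cons (List.Lex.rel h)
    · exact List.Lex.cons (List.Lex.cons (List.Lex.rel h))

theorem lex3_iff_gt (a b c : Char) (ha : bIsDigit a = true) (hb : bIsDigit b = true)
    (hc : bIsDigit c = true) :
    (("255".toList < [a,b,c])) ↔ 255 < horner [a,b,c] 0 := by
  have h255 : "255".toList = ['2','5','5'] := by decide
  rw [h255, lex3]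
  obtain ⟨a1, a2⟩ := digit_bounds a ha
  obtain ⟨b1, b2⟩ := digit_bounds b hb
  obtain ⟨c1, c2⟩ := digit_bounds c hc
  have hh : horner [a,b,c] 0
      = 100 * ((a.toNat : Int) - 48) + 10 * ((b.toNat : Int) - 48) + ((c.toNat : Int) - 48) := by
    simp [horner_cons, horner_nil]; ring
  rw [hh, char_lt_iff, char_lt_iff, char_lt_iff, char_eq_iff, char_eq_iff]
  have e2 : ('2' : Char).toNat = 50 := by decide
  have e5 : ('5' : Char).toNat = 53 := by decide
  rw [e2, e5]
  omega

theorem parse_main (cs : List Char) :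
    (if cs.length = 0 then none
     else if 1 < cs.length ∧ cs[0]? = some '0' then none
     else pyLoopA cs 0) =
    (if cs.length = 0 then (none : Option Int)
     else if ¬ (cs.all bIsDigit = true) then none
     else if 1 < cs.length ∧ cs[0]? = some '0' then none
     else if 3 < cs.length ∨ (cs.length = 3 ∧ "255".toList < cs) then none
     else some (bValue cs)) := by
  by_cases h0 : cs.length = 0
  · simp [h0]
  rw [if_neg h0, if_neg h0]
  by_cases hall : cs.all bIsDigit = true
  · rw [if_neg (not_not_intro hall)]
    by_cases hlz : 1 < cs.length ∧ cs[0]? = some '0'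
    · rw [if_pos hlz, if_pos hlz]
    · rw [if_neg hlz, if_neg hlz,
        loop_eq cs 0 hall le_rfl (by norm_num), value_eq_horner]
      have hd := List.all_eq_true.mp hall
      obtain ⟨hge0, hlt⟩ := horner_bounds cs hd
      by_cases h3 : 3 < cs.length
      · -- length ≥ 4, no leading zero → value ≥ 1000
        obtain ⟨c, rest, rfl⟩ : ∃ c rest, cs = c :: rest := by
          cases cs with
          | nil => simp at h0
          | cons c rest => exact ⟨c, rest, rfl⟩
        have hne : c ≠ '0' := by
          intro h; exact hlz ⟨by simp only [List.length_cons] at h3 ⊢; omega, by simp [h]⟩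
        obtain ⟨d1, d2⟩ := digit_bounds c (hd c List.mem_cons_self)
        have hd1 : (49 : Int) ≤ (c.toNat : Int) := by
          have : c.toNat ≠ 48 := fun h => hne ((char_eq_iff c '0').mpr (by simpa using h))
          omega
        obtain ⟨r0, _⟩ := horner_bounds rest (fun x hx => hd x (List.mem_cons_of_mem c hx))
        have hbig : 1000 ≤ horner (c :: rest) 0 := by
          rw [horner_cons, horner_acc]
          have hl : 3 ≤ rest.length := by simp at h3; omega
          have hp : (1000 : Int) ≤ 10 ^ rest.length := by
            calc (1000 : Int) = 10 ^ 3 := by norm_num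
            _ ≤ 10 ^ rest.length := pow_le_pow_right₀ (by norm_num) hl
          nlinarith
        rw [if_neg (by omega), if_pos (Or.inl h3)]
      · by_cases hlen3 : cs.length = 3
        · obtain ⟨a, b, c, rfl⟩ := List.length_eq_three.mp hlen3
          have ha := hd a (by simp)
          have hb := hd b (by simp)
          have hc := hd c (by simp)
          by_cases hlex : "255".toList < [a, b, c]
          · have := (lex3_iff_gt a b c ha hb hc).mp hlex
            rw [if_neg (by omega), if_pos (Or.inr ⟨hlen3, hlex⟩)]
          · have := (lex3_iff_gt a b c ha hb hc).not.mp hlex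
            rw [if_pos (by omega), if_neg (by
              push Not
              exact ⟨by omega, fun _ => not_lt.mp hlex⟩)]
        · have hle : cs.length ≤ 2 := by omega
          have hsm : (10 : Int) ^ cs.length ≤ 100 := by
            calc (10 : Int) ^ cs.length ≤ 10 ^ 2 := pow_le_pow_right₀ (by norm_num) hle
            _ = 100 := by norm_num
          rw [if_pos (by omega), if_neg (by push Not; exact ⟨by omega, fun h => absurd h hlen3⟩)]
  · rw [if_pos hall]
    split
    · rfl
    · exact loop_nondigit cs 0 hall

-- ===== VERDICT (by name: the statement is the Claim_ definition above) =====
theorem parse_octet_py_spec : Claim_equal_parse_octet_py := by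
  intro octet _
  unfold Spec_parse_octet_py parse_octet_py parse_octet_py_alt
  simp only [PySem.List.pyGet?_zero]
  exact parse_main octet.toList
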